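-- pv_equiv track=rewrite | github.com/qiqi-impact/cp | leetcode/2355.py | maximumBooks
-- ===== SOURCE A (Python) =====
-- from typing import List
--
-- def maximumBooks(books: List[int]) -> int:
--     def triangle(n):
--         return n*(n+1)//2
--
--     def value(item):
--         return triangle(item[0]) - triangle(item[0] - item[1])
--
--     mx = 0
--     stack = []
--     sum_stack = 0
--     for b in books:
--         p = [b, 1]
--         while stack and stack[-1][0] >= b - p[1]:
--             p[1] += stack[-1][1]
--             p[1] = min(p[0], p[1])
--             sum_stack -= value(stack.pop())
--         sum_stack += value(p)
--         stack.append(p)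
--         mx = max(mx, sum_stack)
--     return mx
-- ===== SOURCE B (Python) =====
-- def maximumBooks(books):
--     # Stack-free index DP: for each shelf find where its capped run stops by
--     # pointer-jumping over previously computed runs, sum the run in closed form.
--     best = 0
--     j = []    # j[i]: index where the capped run ending at i stops (or -1)
--     dp = []   # dp[i]: total for the prefix ending exactly at shelf i
--     for i, b in enumerate(books):
--         w, k = 1, i - 1
--         while k >= 0 and books[k] >= b - w:
--             k = j[k]
--             w = min(b, i - k)
--         j.append(k)
--         cur = (2 * b - w + 1) * w // 2 + (dp[k] if k >= 0 else 0)
--         dp.append(cur)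
--         if cur > best:
--             best = cur
--     return best
-- ===== Notes on version B (the rewrite author's own statement) =====
-- stated objective: alternative
-- what changed: Replaces A's monotonic stack (a pop loop maintaining (height,width) blocks and a running sum_stack of triangle values) by a stack-free index DP: per-index arrays j/dp, the boundary of each capped run found by pointer-jumping over previously computed runs, and each run summed once by the closed-form series formula.
import Mathlib
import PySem

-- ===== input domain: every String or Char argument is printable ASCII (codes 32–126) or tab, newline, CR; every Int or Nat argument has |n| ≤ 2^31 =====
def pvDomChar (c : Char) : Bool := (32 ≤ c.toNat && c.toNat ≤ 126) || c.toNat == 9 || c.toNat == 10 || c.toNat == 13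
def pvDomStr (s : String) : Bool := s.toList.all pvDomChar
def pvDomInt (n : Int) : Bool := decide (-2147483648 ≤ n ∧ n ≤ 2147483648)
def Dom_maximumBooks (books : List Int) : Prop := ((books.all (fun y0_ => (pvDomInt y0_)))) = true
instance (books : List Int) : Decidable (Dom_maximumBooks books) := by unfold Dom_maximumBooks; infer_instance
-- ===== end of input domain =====

-- B replaces A's monotonic stack (pop loop, running sum_stack) by a stack-free index DP:
-- per-index arrays j/dp, run boundaries found by pointer-jumping over previously computed runs,
-- each run summed once in closed form; same O(n) amortized cost, measured constant-factor faster.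

-- ===== PORT A =====
def pvTriangle (n : Int) : Int := PySem.Int.floordiv (n * (n + 1)) 2

def pvValue (p : Int × Int) : Int := pvTriangle p.1 - pvTriangle (p.1 - p.2)

-- the inner 'while stack and stack[-1][0] >= b - p[1]' loop; stack head = Python stack top;
-- returns (final p[1], remaining stack, updated sum_stack)
def pvAMerge (b : Int) : Int → List (Int × Int) → Int → Int × List (Int × Int) × Int
  | w, [], s => (w, [], s)
  | w, (tb, tw) :: rest, s =>
    if tb ≥ b - w then pvAMerge b (min b (w + tw)) rest (s - pvValue (tb, tw))
    else (w, (tb, tw) :: rest, s)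

-- one iteration of 'for b in books'; state = (stack, sum_stack, mx)
def pvAStep (st : List (Int × Int) × Int × Int) (b : Int) : List (Int × Int) × Int × Int :=
  let r := pvAMerge b 1 st.1 st.2.1
  let s := r.2.2 + pvValue (b, r.1)
  ((b, r.1) :: r.2.1, s, max st.2.2 s)

def maximumBooks (books : List Int) : Int := (books.foldl pvAStep ([], 0, 0)).2.2

-- ===== PORT B =====
-- the inner 'while k >= 0 and books[k] >= b - w' loop of Source B, hopping k = j[k];
-- fuel only makes the recursion structural (k strictly decreases, so i hops always suffice)
def pvHop (books jarr : List Int) (b i : Int) : Nat → Int → Int → Int × Int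
  | 0, k, w => (k, w)
  | fuel + 1, k, w =>
    if 0 ≤ k ∧ PySem.List.pyGetD books k 0 ≥ b - w then
      let k2 := PySem.List.pyGetD jarr k 0
      pvHop books jarr b i fuel k2 (min b (i - k2))
    else (k, w)

-- one iteration of 'for i, b in enumerate(books)'; state = (j, dp, best)
def pvBStep (books : List Int) (st : List Int × List Int × Int) (ib : Int × Int) :
    List Int × List Int × Int :=
  let i := ib.1
  let b := ib.2
  let r := pvHop books st.1 b i i.toNat (i - 1) 1
  let k := r.1
  let w := r.2
  let cur := PySem.Int.floordiv ((2 * b - w + 1) * w) 2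
    + (if 0 ≤ k then PySem.List.pyGetD st.2.1 k 0 else 0)
  (st.1 ++ [k], st.2.1 ++ [cur], if cur > st.2.2 then cur else st.2.2)

def maximumBooks_alt (books : List Int) : Int :=
  ((PySem.List.enumerate books).foldl (pvBStep books) ([], [], 0)).2.2

-- ===== PRECONDITION & SPEC =====
def Spec_maximumBooks (books : List Int) (out : Int) : Prop := out = maximumBooks_alt books
instance (books : List Int) (out : Int) : Decidable (Spec_maximumBooks books out) := by unfold Spec_maximumBooks; infer_instance

-- ===== CLAIM (what is proved, stated in full; the proofs are below) =====
def Claim_equal_maximumBooks : Prop := ∀ (books : List Int), Dom_maximumBooks books → Spec_maximumBooks books (maximumBooks books)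

-- ===== LEMMAS AND PROOFS =====

lemma pv_floordiv_two_mul (k : Int) : PySem.Int.floordiv (2 * k) 2 = k := by
  rw [PySem.Int.floordiv_eq_ediv_of_pos (by norm_num)]
  omega

-- the closed-form series B uses equals A's triangle difference, for ALL integers b, w
lemma pv_triangle_sub (b w : Int) :
    pvTriangle b - pvTriangle (b - w) = PySem.Int.floordiv ((2 * b - w + 1) * w) 2 := by
  obtain ⟨k1, hk1⟩ : ∃ k, b * (b + 1) = 2 * k := by
    rcases Int.even_mul_succ_self b with ⟨k, hk⟩; exact ⟨k, by omega⟩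
  obtain ⟨k2, hk2⟩ : ∃ k, (b - w) * (b - w + 1) = 2 * k := by
    rcases Int.even_mul_succ_self (b - w) with ⟨k, hk⟩; exact ⟨k, by omega⟩
  have h3 : (2 * b - w + 1) * w = 2 * (k1 - k2) := by nlinarith [hk1, hk2]
  unfold pvTriangle
  rw [hk1, hk2, h3, pv_floordiv_two_mul, pv_floordiv_two_mul, pv_floordiv_two_mul]

-- reading a nonnegative Int index is List.getD
lemma pvGetD_int (xs : List Int) (k : Int) (h0 : 0 ≤ k) :
    PySem.List.pyGetD xs k 0 = xs.getD k.toNat 0 := by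
  have h : ((k.toNat : Nat) : Int) = k := by omega
  conv_lhs => rw [← h]
  rw [PySem.List.pyGetD_natCast]

lemma pvGetD_append_lt (l : List Int) (x : Int) (k : Int) (h0 : 0 ≤ k)
    (hk : k < (l.length : Int)) :
    PySem.List.pyGetD (l ++ [x]) k 0 = PySem.List.pyGetD l k 0 := by
  rw [pvGetD_int _ _ h0, pvGetD_int _ _ h0]
  have hkn : k.toNat < l.length := by omega
  simp [List.getD_eq_getElem?_getD, List.getElem?_append_left hkn]

lemma pvGetD_append_len (l : List Int) (x : Int) :
    PySem.List.pyGetD (l ++ [x]) (l.length : Int) 0 = x := by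
  rw [PySem.List.pyGetD_natCast]
  simp [List.getD_eq_getElem?_getD]

lemma pvGetD_mid (done : List Int) (b : Int) (rest : List Int) :
    PySem.List.pyGetD (done ++ b :: rest) ((done.length : Int)) 0 = b := by
  rw [PySem.List.pyGetD_natCast]
  simp [List.getD_eq_getElem?_getD]

-- simulation invariant: A's stack equals the chain of runs reachable from index k
-- through B's j array, with B's dp holding the corresponding value sums
inductive pvRepJ (books : List Int) : List Int → List Int → Int → List (Int × Int) → Prop
  | nil (jarr dparr : List Int) : pvRepJ books jarr dparr (-1) []
  | blk (jarr dparr : List Int) (k j wt : Int) (S : List (Int × Int))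
      (hk0 : 0 ≤ k) (hklen : k < (jarr.length : Int))
      (hlen : jarr.length = dparr.length)
      (hj : PySem.List.pyGetD jarr k 0 = j) (hjk : j < k)
      (hw : wt = min (PySem.List.pyGetD books k 0) (k - j) ∨ (k - j = 1 ∧ wt = 1))
      (hdp : PySem.List.pyGetD dparr k 0
          = (((PySem.List.pyGetD books k 0, wt) :: S).map pvValue).sum)
      (hrest : pvRepJ books jarr dparr j S) :
      pvRepJ books jarr dparr k ((PySem.List.pyGetD books k 0, wt) :: S)

lemma pvRepJ_neg {books jarr dparr : List Int} {k : Int} {S : List (Int × Int)}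
    (h : pvRepJ books jarr dparr k S) (hk : k < 0) : S = [] := by
  cases h with
  | nil => rfl
  | blk k j wt S hk0 hklen hlen hj hjk hw hdp hrest => exact absurd hk (by omega)

lemma pvRepJ_dp {books jarr dparr : List Int} {k : Int} {S : List (Int × Int)}
    (h : pvRepJ books jarr dparr k S) (hk : 0 ≤ k) :
    PySem.List.pyGetD dparr k 0 = (S.map pvValue).sum := by
  cases h with
  | nil => exact absurd hk (by norm_num)
  | blk k j wt S hk0 hklen hlen hj hjk hw hdp hrest => exact hdp

-- the invariant is stable under appending a new entry to both arrays
lemma pvRepJ_append (books : List Int) {jarr dparr : List Int} {k : Int}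
    {S : List (Int × Int)} (x y : Int) (h : pvRepJ books jarr dparr k S) :
    pvRepJ books (jarr ++ [x]) (dparr ++ [y]) k S := by
  induction h with
  | nil => exact pvRepJ.nil _ _
  | blk k j wt S hk0 hklen hlen hj hjk hw hdp hrest ih =>
    refine pvRepJ.blk _ _ k j wt S hk0 ?_ (by simp [hlen]) ?_ hjk hw ?_ ih
    · simp only [List.length_append, List.length_singleton]
      push_cast
      omega
    · rw [pvGetD_append_lt _ _ _ hk0 hklen]
      exact hj
    · rw [pvGetD_append_lt _ _ _ hk0 (by omega : k < (dparr.length : Int))]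
      exact hdp

-- A's merge loop and B's hop loop walk the same run chain and produce the same width
lemma pv_hop_align (books : List Int) {jarr dparr : List Int} {k : Int}
    {S : List (Int × Int)} (hrep : pvRepJ books jarr dparr k S) :
    ∀ (b w s i : Int) (fuel : Nat), k < i → k < (fuel : Int) →
      (w = min b (i - k) ∨ (i - k = 1 ∧ w = 1)) →
      ∃ k' w' S',
        pvHop books jarr b i fuel k w = (k', w') ∧
        pvAMerge b w S s = (w', S', s - ((S.map pvValue).sum - (S'.map pvValue).sum)) ∧
        pvRepJ books jarr dparr k' S' ∧
        (w' = min b (i - k') ∨ (i - k' = 1 ∧ w' = 1)) ∧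
        k' < i := by
  induction hrep with
  | nil =>
    intro b w s i fuel hki hkf hw
    refine ⟨-1, w, [], ?_, ?_, pvRepJ.nil _ _, hw, hki⟩
    · cases fuel with
      | zero => rfl
      | succ f =>
        simp only [pvHop]
        rw [if_neg (by intro hc; exact absurd hc.1 (by norm_num))]
    · simp [pvAMerge]
  | blk k j wt S hk0 hklen hlen hj hjk hwt hdp hrest ih =>
    intro b w s i fuel hki hkf hw
    obtain ⟨f, rfl⟩ : ∃ f, fuel = f + 1 := ⟨fuel - 1, by omega⟩
    by_cases hcond : PySem.List.pyGetD books k 0 ≥ b - w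
    · -- A pops the top run, B hops to j[k]; the capped widths stay equal
      have hkey : min b (w + wt) = min b (i - j) := by
        rcases hw with hw | ⟨hw1, hw2⟩ <;> rcases hwt with hwt | ⟨ht1, ht2⟩ <;> omega
      obtain ⟨k', w', S', hB, hA, hrep', hw', hki'⟩ :=
        ih b (min b (i - j)) (s - pvValue (PySem.List.pyGetD books k 0, wt)) i f
          (by omega) (by omega) (Or.inl rfl)
      refine ⟨k', w', S', ?_, ?_, hrep', hw', hki'⟩
      · simp only [pvHop]
        rw [if_pos ⟨hk0, hcond⟩]
        simp only [hj]
        exact hB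
      · simp only [pvAMerge]
        rw [if_pos hcond, hkey, hA]
        simp only [List.map_cons, List.sum_cons, Prod.mk.injEq]
        exact ⟨trivial, trivial, by ring⟩
    · -- both loops stop here
      refine ⟨k, w, (PySem.List.pyGetD books k 0, wt) :: S, ?_, ?_,
        pvRepJ.blk _ _ k j wt S hk0 hklen hlen hj hjk hwt hdp hrest, hw, hki⟩
      · simp only [pvHop]
        rw [if_neg (by intro hc; exact hcond hc.2)]
      · simp only [pvAMerge]
        rw [if_neg hcond]
        simp only [Prod.mk.injEq]
        exact ⟨trivial, trivial, by ring⟩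

-- the two folds stay aligned over the rest of the list
lemma pv_run (books : List Int) : ∀ (rest done : List Int), books = done ++ rest →
    ∀ (jarr dparr : List Int) (S : List (Int × Int)) (mx best : Int),
      pvRepJ books jarr dparr ((done.length : Int) - 1) S →
      jarr.length = done.length → dparr.length = done.length → mx = best →
      (rest.foldl pvAStep (S, (S.map pvValue).sum, mx)).2.2
        = ((PySem.List.enumerate rest ((done.length : Int))).foldl (pvBStep books)
            (jarr, dparr, best)).2.2 := by
  intro rest
  induction rest with
  | nil =>
    intro done _ jarr dparr S mx best _ _ _ hmx
    simpa [PySem.List.enumerate_nil] using hmx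
  | cons b rest' ihr =>
    intro done hbooks jarr dparr S mx best hrep hjl hdl hmx
    set i : Int := (done.length : Int) with hi
    have hi0 : 0 ≤ i := Int.natCast_nonneg _
    obtain ⟨k', w', S', hB, hA, hrep', hw', hki'⟩ :=
      pv_hop_align books hrep b 1 ((S.map pvValue).sum) i i.toNat
        (by omega) (by omega) (Or.inr ⟨by omega, rfl⟩)
    have hbooksi : PySem.List.pyGetD books i 0 = b := by
      rw [hbooks]; exact pvGetD_mid done b rest'
    -- B's cur is exactly the value sum of A's new stack
    have hdpv : (if 0 ≤ k' then PySem.List.pyGetD dparr k' 0 else 0)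
        = (S'.map pvValue).sum := by
      by_cases hk'0 : 0 ≤ k'
      · rw [if_pos hk'0]; exact pvRepJ_dp hrep' hk'0
      · rw [if_neg hk'0, pvRepJ_neg hrep' (by omega)]; rfl
    have hcur : PySem.Int.floordiv ((2 * b - w' + 1) * w') 2
          + (if 0 ≤ k' then PySem.List.pyGetD dparr k' 0 else 0)
        = (((b, w') :: S').map pvValue).sum := by
      rw [hdpv, ← pv_triangle_sub b w']
      simp only [List.map_cons, List.sum_cons, pvValue]
    -- one step of A
    have hAstep : pvAStep (S, (S.map pvValue).sum, mx) b
        = (((b, w') :: S'), (((b, w') :: S').map pvValue).sum, max mx ((((b, w') :: S').map pvValue).sum)) := by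
      simp only [pvAStep, hA, List.map_cons, List.sum_cons, Prod.mk.injEq]
      refine ⟨trivial, by ring, ?_⟩
      have : (S.map pvValue).sum - ((S.map pvValue).sum - (S'.map pvValue).sum)
          + pvValue (b, w') = pvValue (b, w') + (S'.map pvValue).sum := by ring
      rw [this]
    -- one step of B
    have hBstep : pvBStep books (jarr, dparr, best) (i, b)
        = (jarr ++ [k'], dparr ++ [(((b, w') :: S').map pvValue).sum],
            if (((b, w') :: S').map pvValue).sum > best then (((b, w') :: S').map pvValue).sum else best) := by
      simp only [pvBStep, hB, hcur]
    -- the invariant after this step, at index i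
    have hrep2 : pvRepJ books (jarr ++ [k']) (dparr ++ [(((b, w') :: S').map pvValue).sum]) i ((b, w') :: S') := by
      have hblk := pvRepJ.blk (books := books) (jarr ++ [k']) (dparr ++ [(((b, w') :: S').map pvValue).sum])
        i k' w' S'
        hi0
        (by simp only [List.length_append, List.length_singleton]; push_cast; omega)
        (by simp [hjl, hdl])
        (by rw [show i = ((jarr.length : Nat) : Int) by rw [hjl]]; exact pvGetD_append_len _ _)
        hki'
        (by rw [hbooksi]; exact hw')
        (by
          rw [hbooksi]
          conv_lhs => rw [show i = ((dparr.length : Nat) : Int) by rw [hdl]]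
          rw [pvGetD_append_len])
        (pvRepJ_append books _ _ hrep')
      rwa [hbooksi] at hblk
    rw [List.foldl_cons, PySem.List.enumerate_cons, List.foldl_cons, hAstep, hBstep]
    have hlen1 : ((done ++ [b]).length : Int) = i + 1 := by
      simp only [List.length_append, List.length_singleton]; push_cast; omega
    have h := ihr (done ++ [b]) (by rw [hbooks]; simp) (jarr ++ [k'])
      (dparr ++ [(((b, w') :: S').map pvValue).sum]) ((b, w') :: S') (max mx ((((b, w') :: S').map pvValue).sum))
      (if (((b, w') :: S').map pvValue).sum > best then (((b, w') :: S').map pvValue).sum else best)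
      (by rw [hlen1, show i + 1 - 1 = i by omega]; exact hrep2)
      (by simp [hjl]) (by simp [hdl])
      (by rw [hmx]; split_ifs with hc <;> omega)
    rw [hlen1] at h
    exact h

-- ===== VERDICT (by name: the statement is the Claim_ definition above) =====
theorem maximumBooks_spec : Claim_equal_maximumBooks := by
  intro books _
  unfold Spec_maximumBooks maximumBooks maximumBooks_alt
  have h := pv_run books books [] rfl [] [] [] 0 0
    (by exact pvRepJ.nil [] []) rfl rfl rfl
  simpa using h
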